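-- pv_equiv track=rewrite | github.com/Choigapju/- | 프로그래머스  /모음 사전 /code.py | solution
-- ===== SOURCE A (Python) =====
-- def solution(word):
--     answer = 0
--     alphabets = {'A': 0, 'E': 1, 'I': 2, 'O': 3, 'U': 4}
--     length = len(word)
--
--     for i in range(length):
--         for j in range(5 - i):
--             answer += alphabets[word[i]] * (5 ** j)
--         answer += 1
--
--     return answer
-- ===== SOURCE B (Python) =====
-- def solution(word):
--     alphabets = {'A': 0, 'E': 1, 'I': 2, 'O': 3, 'U': 4}
--     weights = [781, 156, 31, 6, 1]
--     total = len(word)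
--     for i, ch in enumerate(word[:5]):
--         total += alphabets[ch] * weights[i]
--     return total
-- ===== Notes on version B (the rewrite author's own statement) =====
-- stated objective: simpler
-- what changed: Replaces A's per-position inner geometric-sum loop with a precomputed constant weight table [781,156,31,6,1]: B starts from len(word) (the +1 per position) and adds vowel_value * weight for the first five characters in one pass.
import Mathlib
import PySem

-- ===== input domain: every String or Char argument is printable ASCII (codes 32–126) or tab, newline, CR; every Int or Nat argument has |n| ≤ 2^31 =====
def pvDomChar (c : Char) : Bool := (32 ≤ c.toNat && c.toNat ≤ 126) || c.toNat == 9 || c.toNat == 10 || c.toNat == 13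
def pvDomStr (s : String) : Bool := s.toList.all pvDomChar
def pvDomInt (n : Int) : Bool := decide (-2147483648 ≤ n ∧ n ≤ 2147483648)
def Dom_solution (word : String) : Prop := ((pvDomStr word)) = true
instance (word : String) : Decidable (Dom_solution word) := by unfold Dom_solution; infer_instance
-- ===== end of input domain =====

-- B replaces A's inner geometric-sum loop by a constant weight table applied to the first five characters in one pass (simpler; same asymptotic cost).

-- ===== PORT A =====
-- the dict {'A':0,'E':1,'I':2,'O':3,'U':4}
def pvAlphabets : PySem.Dict Char Int :=
  (((((PySem.Dict.empty).insert 'A' 0).insert 'E' 1).insert 'I' 2).insert 'O' 3).insert 'U' 4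

def solution (word : String) : Int :=
  let length : Int := PySem.Str.len word
  (PySem.List.pyRange 0 length 1).foldl
    (fun answer i =>
      let answer :=
        (PySem.List.pyRange 0 (5 - i) 1).foldl
          -- alphabets[word[i]] * 5**j; inside Pre_ the lookups never miss, so the getD defaults are never hit;
          -- j ≥ 0 in range, so 5 ** j = (5:Int) ^ j.toNat exactly
          (fun a j => a + (pvAlphabets.getD (PySem.List.pyGetD word.toList i 'A') 0) * (5:Int) ^ j.toNat)
          answer
      answer + 1) 0

-- ===== PORT B =====
def solution_alt (word : String) : Int :=
  let weights : List Int := [781, 156, 31, 6, 1]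
  (PySem.List.enumerate (PySem.List.slice word.toList none (some 5)) 0).foldl
    (fun total p => total + (pvAlphabets.getD p.2 0) * (PySem.List.pyGetD weights p.1 0))
    (PySem.Str.len word)

-- ===== PRECONDITION & SPEC =====
-- Pre_ excludes exactly the words with a non-vowel among the first five characters, on which A raises KeyError (B raises there too).
def Pre_solution (word : String) : Prop :=
  ((word.toList.take 5).all (fun c => c ∈ ['A', 'E', 'I', 'O', 'U'])) = true
instance (word : String) : Decidable (Pre_solution word) := by unfold Pre_solution; infer_instance
def pvWitness_solution : String := "EIO"

def Spec_solution (word : String) (out : Int) : Prop := out = solution_alt word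
instance (word : String) (out : Int) : Decidable (Spec_solution word out) := by unfold Spec_solution; infer_instance

-- ===== CLAIM (what is proved, stated in full; the proofs are below) =====
def Claim_equal_solution : Prop := ∀ (word : String), Dom_solution word → Pre_solution word → Spec_solution word (solution word)

-- ===== LEMMAS AND PROOFS =====

-- A's inner loop sums v * 5^j for j in range(5-i); its value is v times B's table weight (0 beyond position 4).
lemma pvInnerSum (v a i : Int) (hi : 0 ≤ i) :
    (PySem.List.pyRange 0 (5 - i) 1).foldl (fun acc j => acc + v * (5:Int) ^ j.toNat) a
      = a + (v * (if i < 5 then PySem.List.pyGetD [781, 156, 31, 6, 1] i 0 else 0) + 1) - 1 := by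
  by_cases h5 : i < 5
  · interval_cases i <;> simp [PySem.List.pyRange, PySem.List.pyGetD, List.range_succ] <;> ring
  · rw [PySem.List.pyRange_one_eq_nil (by omega)]
    simp [h5]

theorem solution_spec : Claim_equal_solution := by
  intro word _ _
  unfold Spec_solution solution solution_alt
  simp only [PySem.Str.len_eq]
  set xs := word.toList with hxs
  set n : Nat := xs.length with hn
  -- A side: fold body adds v i * Wt i + 1 at each i
  rw [PySem.List.foldl_congr_mem (PySem.List.pyRange 0 (n : Int) 1) _
      (fun acc i => acc + ((pvAlphabets.getD (PySem.List.pyGetD xs i 'A') 0)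
        * (if i < 5 then PySem.List.pyGetD [781, 156, 31, 6, 1] i 0 else 0) + 1)) 0
      (by
        intro acc i hi
        have h0 : 0 ≤ i := ((PySem.List.mem_pyRange_one).1 hi).1
        simp only [pvInnerSum _ acc i h0]
        ring)]
  rw [PySem.List.foldl_add]
  -- B side
  rw [PySem.List.slice_to xs (by norm_num), PySem.List.enumerate_eq_map_pyRange (d := 'A'), List.foldl_map]
  rw [PySem.List.foldl_add]
  simp only [PySem.List.len, List.length_take, show (5:Int).toNat = 5 from rfl]
  set m : Nat := min 5 n with hm
  have hmn : (m : Int) ≤ (n : Int) := by exact_mod_cast Nat.min_le_right 5 n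
  -- split A's range at m
  rw [PySem.List.pyRange_one_append 0 (m : Int) (n : Int) (by positivity) hmn]
  rw [List.map_append, List.sum_append]
  -- the tail (i ≥ 5) contributes only the +1's
  have htail : ((PySem.List.pyRange (m : Int) (n : Int) 1).map
      (fun i => pvAlphabets.getD (PySem.List.pyGetD xs i 'A') 0
        * (if i < 5 then PySem.List.pyGetD [781, 156, 31, 6, 1] i 0 else 0) + 1)).sum
      = ((n : Int) - (m : Int)) := by
    by_cases hc : n ≤ 5
    · have : m = n := by omega
      rw [this]
      rw [PySem.List.pyRange_one_eq_nil (le_refl _)]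
      simp
    · have hm5 : (m : Int) = 5 := by simp only [hm]; omega
      have : ∀ x ∈ PySem.List.pyRange (m : Int) (n : Int) 1,
          pvAlphabets.getD (PySem.List.pyGetD xs x 'A') 0
            * (if x < 5 then PySem.List.pyGetD [781, 156, 31, 6, 1] x 0 else 0) + 1 = 1 := by
        intro x hx
        have := (PySem.List.mem_pyRange_one).1 hx
        have hx5 : ¬ x < 5 := by omega
        simp [hx5]
      rw [List.map_congr_left this]
      simp [PySem.List.length_pyRange_one]
      omega
  rw [htail]
  -- the head equals B's sum, term by term
  have hhead : ((PySem.List.pyRange 0 (m : Int) 1).map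
      (fun i => pvAlphabets.getD (PySem.List.pyGetD xs i 'A') 0
        * (if i < 5 then PySem.List.pyGetD [781, 156, 31, 6, 1] i 0 else 0) + 1)).sum
      = ((PySem.List.pyRange 0 (m : Int) 1).map
      (fun j => pvAlphabets.getD (PySem.List.pyGetD (xs.take 5) j 'A') 0
        * PySem.List.pyGetD [781, 156, 31, 6, 1] j 0 + 1)).sum := by
    refine congrArg List.sum (List.map_congr_left ?_)
    intro j hj
    have hjb := (PySem.List.mem_pyRange_one).1 hj
    have hj5 : j < 5 := by
      have : (m : Int) ≤ 5 := by exact_mod_cast Nat.min_le_left 5 n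
      omega
    have hjn : j.toNat < n := by omega
    have hjm : j.toNat < m := by omega
    have hget : PySem.List.pyGetD (xs.take 5) j 'A' = PySem.List.pyGetD xs j 'A' := by
      rw [PySem.List.pyGetD_eq_getElem _ 'A' hjb.1 (by simp [List.length_take]; omega),
          PySem.List.pyGetD_eq_getElem _ 'A' hjb.1 (by simp only [hn] at hjn ⊢; omega)]
      exact List.getElem_take
    rw [hget]
    simp [hj5]
  rw [hhead]
  -- both sides: n + Σ head; massage the +1's
  have : ((PySem.List.pyRange 0 (m : Int) 1).map
      (fun j => pvAlphabets.getD (PySem.List.pyGetD (xs.take 5) j 'A') 0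
        * PySem.List.pyGetD [781, 156, 31, 6, 1] j 0 + 1)).sum
      = ((PySem.List.pyRange 0 (m : Int) 1).map
      (fun j => pvAlphabets.getD (PySem.List.pyGetD (xs.take 5) j 'A') 0
        * PySem.List.pyGetD [781, 156, 31, 6, 1] j 0)).sum + (m : Int) := by
    rw [PySem.List.sum_map_add_int]
    simp [PySem.List.length_pyRange_one]
  rw [this]
  ring
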